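-- pv_equiv track=rewrite | github.com/jacoblinden/aoc | day01/aoc.py | getSolutionPart2
-- ===== SOURCE A (Python) =====
-- def is_prime_number(number):
--     is_prime = True
--     if number > 1:
--         for divisible in range(2, number):
--             if number % divisible == 0:
--                 is_prime = False
--                 break
--     return is_prime
--
-- def multiplier(index):
--     multi = -1
--     if index % 2 == 0:
--         multi = 1
--     return multi
--
-- def getSolutionPart2(input_list):
--     index = 0
--     tot = 0
--     for num in input_list:
--         if not is_prime_number(num):
--             tot += num * multiplier(index)
--         index += 1
--     return tot
-- ===== SOURCE B (Python) =====
-- def _has_small_divisor(n):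
--     d = 2
--     while d * d <= n:
--         if n % d == 0:
--             return True
--         d += 1
--     return False
--
-- def getSolutionPart2(input_list):
--     return sum((num if i % 2 == 0 else -num)
--                for i, num in enumerate(input_list)
--                if num > 1 and _has_small_divisor(num))
-- ===== Notes on version B (the rewrite author's own statement) =====
-- stated objective: faster
-- what changed: Replaces A's indexed accumulator loop with trial division up to num-1 by a filter/map/sum comprehension over enumerate whose compositeness test only trials divisors d with d*d <= num.
import Mathlib
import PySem

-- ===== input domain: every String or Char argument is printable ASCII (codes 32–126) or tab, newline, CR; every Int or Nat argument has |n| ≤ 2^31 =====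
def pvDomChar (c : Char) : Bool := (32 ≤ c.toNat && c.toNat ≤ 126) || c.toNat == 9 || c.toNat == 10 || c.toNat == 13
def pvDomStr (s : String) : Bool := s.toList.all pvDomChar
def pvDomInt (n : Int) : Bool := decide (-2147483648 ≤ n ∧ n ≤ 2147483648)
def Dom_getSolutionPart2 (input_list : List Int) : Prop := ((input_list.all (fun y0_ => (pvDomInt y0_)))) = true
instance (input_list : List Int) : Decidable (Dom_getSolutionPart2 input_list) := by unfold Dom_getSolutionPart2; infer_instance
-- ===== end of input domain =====

-- B replaces A's indexed accumulator loop (trial division by every d < n) with a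
-- filter/map/sum over enumerate whose compositeness test only trials divisors with d*d ≤ n (faster in a timing run).

-- ===== PORT A =====
-- the 'for divisible in range(2, number): if number % divisible == 0: is_prime = False; break' loop
-- (range is lazy in Python, so it is ported as a counting loop, not a materialized list)
def isPrimeLoop (number divisible : Int) : Bool :=
  if divisible < number then
    if PySem.Int.mod number divisible == 0 then false
    else isPrimeLoop number (divisible + 1)
  else true
termination_by (number - divisible).toNat

def is_prime_number (number : Int) : Bool :=
  if number > 1 then isPrimeLoop number 2
  else true

def multiplier (index : Int) : Int :=
  if PySem.Int.mod index 2 == 0 then 1 else -1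

def getSolutionPart2 (input_list : List Int) : Int :=
  (input_list.foldl (fun (st : Int × Int) num =>
      (st.1 + 1, if !(is_prime_number num) then st.2 + num * multiplier st.1 else st.2))
    (0, 0)).2

-- ===== PORT B =====
-- 'while d * d <= n: …; d += 1' starting at d = 2; the '2 ≤ d' conjunct is a totality
-- guard only: the loop is entered at d = 2 and d only increases, so it is always true.
def hasSmallDivisorFrom (n d : Int) : Bool :=
  if h : 2 ≤ d ∧ d * d ≤ n then
    if PySem.Int.mod n d == 0 then true else hasSmallDivisorFrom n (d + 1)
  else false
termination_by (n - d).toNat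
decreasing_by
  have h1 : 2 * d ≤ d * d := by nlinarith
  omega

def hasSmallDivisor (n : Int) : Bool := hasSmallDivisorFrom n 2

def getSolutionPart2_alt (input_list : List Int) : Int :=
  (((PySem.List.enumerate input_list 0).filter
      (fun p => decide (1 < p.2) && hasSmallDivisor p.2)).map
    (fun p => if PySem.Int.mod p.1 2 == 0 then p.2 else -p.2)).sum

-- ===== PRECONDITION & SPEC =====
def Spec_getSolutionPart2 (input_list : List Int) (out : Int) : Prop := out = getSolutionPart2_alt input_list
instance (input_list : List Int) (out : Int) : Decidable (Spec_getSolutionPart2 input_list out) := by unfold Spec_getSolutionPart2; infer_instance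

-- ===== CLAIM (what is proved, stated in full; the proofs are below) =====
def Claim_equal_getSolutionPart2 : Prop := ∀ (input_list : List Int), Dom_getSolutionPart2 input_list → Spec_getSolutionPart2 input_list (getSolutionPart2 input_list)

-- ===== LEMMAS AND PROOFS =====

theorem ipl_aux (k : Nat) : ∀ (n d : Int), (n - d).toNat ≤ k →
    (isPrimeLoop n d = false ↔ ∃ e, d ≤ e ∧ e < n ∧ e ∣ n) := by
  induction k with
  | zero =>
    intro n d hk
    rw [isPrimeLoop, if_neg (by omega)]
    simp only [Bool.true_eq_false, false_iff]
    rintro ⟨e, he, hen, -⟩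
    omega
  | succ k ih =>
    intro n d hk
    by_cases h : d < n
    · rw [isPrimeLoop, if_pos h]
      by_cases hm : PySem.Int.mod n d = 0
      · rw [if_pos (by simpa using hm)]
        simp only [true_iff]
        exact ⟨d, le_refl d, h, (PySem.Int.mod_eq_zero_iff_dvd n d).mp hm⟩
      · rw [if_neg (by simpa using hm)]
        rw [ih n (d + 1) (by omega)]
        constructor
        · rintro ⟨e, he, h2, h3⟩; exact ⟨e, by omega, h2, h3⟩
        · rintro ⟨e, he, h2, h3⟩
          refine ⟨e, ?_, h2, h3⟩
          rcases eq_or_lt_of_le he with rfl | hlt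
          · exact absurd ((PySem.Int.mod_eq_zero_iff_dvd n d).mpr h3) hm
          · omega
    · rw [isPrimeLoop, if_neg h]
      simp only [Bool.true_eq_false, false_iff]
      rintro ⟨e, he, hen, -⟩
      omega

theorem is_prime_false_iff (n : Int) :
    is_prime_number n = false ↔ 1 < n ∧ ∃ d, 2 ≤ d ∧ d < n ∧ d ∣ n := by
  unfold is_prime_number
  by_cases h : n > 1
  · rw [if_pos h, ipl_aux (n - 2).toNat n 2 (le_refl _)]
    constructor
    · rintro ⟨d, h2, hlt, hdvd⟩
      exact ⟨h, d, h2, hlt, hdvd⟩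
    · rintro ⟨-, d, h2, hlt, hdvd⟩
      exact ⟨d, h2, hlt, hdvd⟩
  · rw [if_neg h]
    simp [h]

theorem hsd_iff_aux (k : Nat) : ∀ (n d : Int), (n - d).toNat ≤ k → 2 ≤ d →
    (hasSmallDivisorFrom n d = true ↔ ∃ e, d ≤ e ∧ e * e ≤ n ∧ e ∣ n) := by
  induction k with
  | zero =>
    intro n d hk hd
    have hle : n ≤ d := by omega
    have hnd : n < d * d := by nlinarith
    rw [hasSmallDivisorFrom, dif_neg (by rintro ⟨-, h2⟩; omega)]
    simp only [Bool.false_eq_true, false_iff]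
    rintro ⟨e, he, hee, -⟩
    nlinarith
  | succ k ih =>
    intro n d hk hd
    by_cases h : d * d ≤ n
    · rw [hasSmallDivisorFrom, dif_pos ⟨hd, h⟩]
      by_cases hm : PySem.Int.mod n d = 0
      · rw [if_pos (by simpa using hm)]
        simp only [true_iff]
        exact ⟨d, le_refl d, h, (PySem.Int.mod_eq_zero_iff_dvd n d).mp hm⟩
      · rw [if_neg (by simpa using hm)]
        have hdn : d < n := by nlinarith
        rw [ih n (d + 1) (by omega) (by omega)]
        constructor
        · rintro ⟨e, he, h2, h3⟩; exact ⟨e, by omega, h2, h3⟩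
        · rintro ⟨e, he, h2, h3⟩
          refine ⟨e, ?_, h2, h3⟩
          rcases eq_or_lt_of_le he with rfl | hlt
          · exact absurd ((PySem.Int.mod_eq_zero_iff_dvd n d).mpr h3) hm
          · omega
    · rw [hasSmallDivisorFrom, dif_neg (by rintro ⟨-, h2⟩; exact h h2)]
      simp only [Bool.false_eq_true, false_iff]
      rintro ⟨e, he, hee, -⟩
      nlinarith

theorem hasSmallDivisorFrom_true_iff (n d : Int) (hd : 2 ≤ d) :
    hasSmallDivisorFrom n d = true ↔ ∃ e, d ≤ e ∧ e * e ≤ n ∧ e ∣ n :=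
  hsd_iff_aux (n - d).toNat n d (le_refl _) hd

-- the two compositeness tests agree on every integer
theorem composite_eq (n : Int) :
    (decide (1 < n) && hasSmallDivisor n) = !(is_prime_number n) := by
  by_cases h1 : 1 < n
  · by_cases hc : ∃ d, 2 ≤ d ∧ d < n ∧ d ∣ n
    · obtain ⟨d, h2, hlt, hdvd⟩ := hc
      have hB : hasSmallDivisor n = true := by
        rw [hasSmallDivisor, hasSmallDivisorFrom_true_iff n 2 (le_refl 2)]
        by_cases hdd : d * d ≤ n
        · exact ⟨d, h2, hdd, hdvd⟩
        · obtain ⟨e, rfl⟩ := hdvd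
          have he2 : 2 ≤ e := by nlinarith
          refine ⟨e, he2, ?_, dvd_mul_left e d⟩
          -- e * e ≤ n since d * d > n = d * e forces e < d, then e*e ≤ e*d ≤ n
          nlinarith
      have hA : is_prime_number n = false :=
        (is_prime_false_iff n).mpr ⟨h1, d, h2, hlt, hdvd⟩
      simp [hA, hB, h1]
    · have hB : hasSmallDivisor n = false := by
        rw [hasSmallDivisor]
        rw [Bool.eq_false_iff]
        intro htrue
        obtain ⟨e, he2, hee, hdvd⟩ := (hasSmallDivisorFrom_true_iff n 2 (le_refl 2)).mp htrue
        refine hc ⟨e, he2, ?_, hdvd⟩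
        nlinarith
      have hA : is_prime_number n = true := by
        cases hp : is_prime_number n
        · exact absurd ((is_prime_false_iff n).mp hp).2 hc
        · rfl
      simp [hA, hB]
  · have hA : is_prime_number n = true := by
      cases hp : is_prime_number n
      · exact absurd ((is_prime_false_iff n).mp hp).1 h1
      · rfl
    simp [hA, h1]

-- x * multiplier i is the signed value B uses
theorem mul_multiplier (x i : Int) :
    x * multiplier i = if PySem.Int.mod i 2 == 0 then x else -x := by
  unfold multiplier
  split_ifs <;> ring

-- loop invariant: A's fold from state (i, t) = t + B's filtered signed sum with indices from i
theorem fold_eq_sum (L : List Int) (i t : Int) :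
    (L.foldl (fun (st : Int × Int) num =>
        (st.1 + 1, if !(is_prime_number num) then st.2 + num * multiplier st.1 else st.2))
      (i, t)).2
    = t + (((PySem.List.enumerate L i).filter
        (fun p => decide (1 < p.2) && hasSmallDivisor p.2)).map
      (fun p => if PySem.Int.mod p.1 2 == 0 then p.2 else -p.2)).sum := by
  induction L generalizing i t with
  | nil => simp [PySem.List.enumerate_nil]
  | cons x L ih =>
    simp only [List.foldl_cons, PySem.List.enumerate_cons, List.filter_cons]
    rw [ih]
    rw [← composite_eq x]
    by_cases hx : (decide (1 < x) && hasSmallDivisor x) = true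
    · simp only [hx, if_pos, List.map_cons, List.sum_cons, mul_multiplier]
      ring
    · simp only [Bool.not_eq_true] at hx
      simp [hx]

-- ===== VERDICT (by name: the statement is the Claim_ definition above) =====
theorem getSolutionPart2_spec : Claim_equal_getSolutionPart2 := by
  intro input_list _
  unfold Spec_getSolutionPart2 getSolutionPart2 getSolutionPart2_alt
  rw [fold_eq_sum]
  ring
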